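-- pv_equiv track=rewrite | github.com/altareen/csp | 12FinalExamReview/chap8lists.py | countarticles
-- ===== SOURCE A (Python) =====
-- def countarticles(text):
--     sentence = text.split()
--     outcome = []
--     articles = ["a", "an", "the"]
--     for word in articles:
--         amount = sentence.count(word)
--         outcome.append(amount)
--     return outcome
-- ===== SOURCE B (Python) =====
-- def countarticles(text):
--     a = an = the = 0
--     for word in text.split():
--         if word == "a":
--             a += 1
--         elif word == "an":
--             an += 1
--         elif word == "the":
--             the += 1
--     return [a, an, the]
-- ===== Notes on version B (the rewrite author's own statement) =====
-- stated objective: simpler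
-- what changed: B makes a single pass over the split words keeping three scalar accumulators (if/elif per word), instead of A's loop over the three articles each doing a full count() scan of the word list and appending to an output list.
import Mathlib
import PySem

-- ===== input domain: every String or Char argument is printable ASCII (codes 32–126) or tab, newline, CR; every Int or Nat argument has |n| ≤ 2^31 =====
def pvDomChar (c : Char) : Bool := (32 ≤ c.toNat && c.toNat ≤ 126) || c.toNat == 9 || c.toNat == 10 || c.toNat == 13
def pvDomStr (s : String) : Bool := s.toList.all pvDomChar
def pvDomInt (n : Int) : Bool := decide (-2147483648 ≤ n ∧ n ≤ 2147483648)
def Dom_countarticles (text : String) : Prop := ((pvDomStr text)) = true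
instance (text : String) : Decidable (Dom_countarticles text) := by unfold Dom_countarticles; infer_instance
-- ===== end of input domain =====

-- B replaces A's per-article count() scans by one pass over the words with three scalar accumulators (simpler, single traversal).

-- ===== PORT A =====
def countarticles (text : String) : List Int :=
  let sentence := PySem.Str.split₀ text
  let articles : List String := ["a", "an", "the"]
  articles.foldl (fun outcome word => outcome ++ [(PySem.List.count sentence word : Int)]) []

-- ===== PORT B =====
-- the body of B's for-loop: bump the matching accumulator
def tallyStep (s : Int × Int × Int) (word : String) : Int × Int × Int :=
  if word == "a" then (s.1 + 1, s.2.1, s.2.2)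
  else if word == "an" then (s.1, s.2.1 + 1, s.2.2)
  else if word == "the" then (s.1, s.2.1, s.2.2 + 1)
  else s

def countarticles_alt (text : String) : List Int :=
  let r := (PySem.Str.split₀ text).foldl tallyStep (0, 0, 0)
  [r.1, r.2.1, r.2.2]

-- ===== PRECONDITION & SPEC =====
def Spec_countarticles (text : String) (out : List Int) : Prop := out = countarticles_alt text
instance (text : String) (out : List Int) : Decidable (Spec_countarticles text out) := by unfold Spec_countarticles; infer_instance

-- ===== CLAIM (what is proved, stated in full; the proofs are below) =====
def Claim_equal_countarticles : Prop := ∀ (text : String), Dom_countarticles text → Spec_countarticles text (countarticles text)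

-- ===== LEMMAS AND PROOFS =====
theorem tally_eq (ws : List String) (s : Int × Int × Int) :
    ws.foldl tallyStep s
    = (s.1 + ws.count "a", s.2.1 + ws.count "an", s.2.2 + ws.count "the") := by
  induction ws generalizing s with
  | nil => simp
  | cons w t ih =>
    rw [List.foldl_cons, ih]
    unfold tallyStep
    split_ifs with h1 h2 h3 <;>
      simp_all [List.count_cons, Prod.ext_iff] <;> push_cast <;> omega

-- ===== VERDICT (by name: the statement is the Claim_ definition above) =====
theorem countarticles_spec : Claim_equal_countarticles := by
  intro text _
  unfold Spec_countarticles countarticles countarticles_alt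
  simp [List.foldl, tally_eq, PySem.List.count]
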